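-- pv_equiv track=rewrite | github.com/wjddn1029/AlgorithmStudy | 연습_J/practice2_1.py | solution
-- ===== SOURCE A (Python) =====
-- def solution(s1, s2, s3):
--     s4 = s1 + s2 + s3
--     s4 = sorted(s4, reverse=True)
--     ans = ''
--     for i in s4:
--         if i in s1:
--             ans += '1'
--         elif i in s2:
--             ans += '2'
--         elif i in s3:
--             ans += '3'
--
--     return ans
-- ===== SOURCE B (Python) =====
-- def solution(s1, s2, s3):
--     s4 = s1 + s2 + s3
--     counts = {}
--     for c in s4:
--         counts[c] = counts.get(c, 0) + 1
--     ans = ''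
--     for c in sorted(counts, reverse=True):
--         if c in s1:
--             label = '1'
--         elif c in s2:
--             label = '2'
--         else:
--             label = '3'
--         ans += label * counts[c]
--     return ans
-- ===== Notes on version B (the rewrite author's own statement) =====
-- stated objective: faster
-- what changed: B builds a frequency dict of the combined string once, sorts only the distinct characters descending, determines each character's source label once by priority membership and emits label*count per distinct key, instead of A's per-occurrence membership chain over the fully sorted multiset.
import Mathlib
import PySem

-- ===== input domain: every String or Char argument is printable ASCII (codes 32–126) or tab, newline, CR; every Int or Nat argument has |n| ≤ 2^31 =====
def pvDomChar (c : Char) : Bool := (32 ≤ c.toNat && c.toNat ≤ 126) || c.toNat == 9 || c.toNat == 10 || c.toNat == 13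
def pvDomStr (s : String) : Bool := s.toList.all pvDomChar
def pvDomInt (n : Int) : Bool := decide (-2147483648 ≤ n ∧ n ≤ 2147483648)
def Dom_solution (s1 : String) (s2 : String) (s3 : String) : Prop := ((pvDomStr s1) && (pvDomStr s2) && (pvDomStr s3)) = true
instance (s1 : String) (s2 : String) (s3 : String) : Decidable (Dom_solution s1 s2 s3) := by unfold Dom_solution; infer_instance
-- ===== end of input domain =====

-- B re-groups the work: frequency dict + one label per distinct character emitted count times,
-- instead of A's per-occurrence membership chain; return values proved equal on all inputs.

-- ===== PORT A =====
def solution (s1 : String) (s2 : String) (s3 : String) : String :=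
  let s4 := s1.toList ++ s2.toList ++ s3.toList
  let s4s := PySem.List.sorted s4 (fun c => c) true
  let ans : List Char := s4s.foldl (fun ans i =>
    if PySem.Chars.isIn [i] s1.toList then ans ++ ['1']
    else if PySem.Chars.isIn [i] s2.toList then ans ++ ['2']
    else if PySem.Chars.isIn [i] s3.toList then ans ++ ['3']
    else ans) []
  String.mk ans

-- ===== PORT B =====
def solution_alt (s1 : String) (s2 : String) (s3 : String) : String :=
  let s4 := s1.toList ++ s2.toList ++ s3.toList
  let counts : PySem.Dict Char Int :=
    s4.foldl (fun d x => d.insert x (d.getD x 0 + 1)) PySem.Dict.empty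
  let keys := PySem.List.sorted counts.keys (fun c => c) true
  let ans : List Char := keys.foldl (fun ans c =>
    let label : Char :=
      if PySem.Chars.isIn [c] s1.toList then '1'
      else if PySem.Chars.isIn [c] s2.toList then '2'
      else '3'
    ans ++ PySem.List.pyRepeat [label] (counts.getD c 0)) []
  String.mk ans

-- ===== PRECONDITION & SPEC =====
def Spec_solution (s1 : String) (s2 : String) (s3 : String) (out : String) : Prop := out = solution_alt s1 s2 s3
instance (s1 : String) (s2 : String) (s3 : String) (out : String) : Decidable (Spec_solution s1 s2 s3 out) := by unfold Spec_solution; infer_instance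

-- ===== CLAIM (what is proved, stated in full; the proofs are below) =====
def Claim_equal_solution : Prop := ∀ (s1 : String) (s2 : String) (s3 : String), Dom_solution s1 s2 s3 → Spec_solution s1 s2 s3 (solution s1 s2 s3)

-- ===== LEMMAS AND PROOFS =====

-- '[c] in l' (a one-character substring test) is membership.
lemma isIn_singleton (c : Char) (l : List Char) :
    PySem.Chars.isIn [c] l = decide (c ∈ l) := by
  by_cases h : c ∈ l
  · simp [h]
    rw [PySem.Chars.isIn_iff_infix]
    obtain ⟨p, q, rfl⟩ := List.append_of_mem h
    exact ⟨p, q, by simp⟩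
  · simp [h]
    rw [PySem.Chars.isIn_eq_false_iff]
    intro hinf
    exact h (hinf.subset (List.mem_singleton_self c))

-- count of a flatMap of replicates over a nodup key list
lemma count_flatMap_replicate (n : Char → Nat) (a : Char) :
    ∀ (ks : List Char), ks.Nodup →
      (ks.flatMap fun c => List.replicate (n c) c).count a = if a ∈ ks then n a else 0 := by
  intro ks
  induction ks with
  | nil => simp
  | cons c t ih =>
    intro hnd
    rw [List.flatMap_cons, List.count_append, List.count_replicate,
        ih (List.Nodup.of_cons hnd)]
    by_cases hac : a = c
    · subst hac
      have : a ∉ t := (List.nodup_cons.mp hnd).1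
      simp [this]
    · simp [hac, Ne.symm hac, List.mem_cons]

-- a strictly descending key list, each key replicated, is a ≥-sorted list
lemma pairwise_flatMap_replicate (n : Char → Nat) :
    ∀ (ks : List Char), ks.Pairwise (fun a b => b < a) →
      (ks.flatMap fun c => List.replicate (n c) c).Pairwise (fun a b => b ≤ a) := by
  intro ks
  induction ks with
  | nil => simp
  | cons c t ih =>
    intro hp
    rw [List.flatMap_cons, List.pairwise_append]
    refine ⟨List.pairwise_replicate.mpr (Or.inr le_rfl), ih (List.pairwise_cons.mp hp).2, ?_⟩
    intro a ha b hb
    have hac : a = c := List.eq_of_mem_replicate ha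
    obtain ⟨c', hc', hb'⟩ := List.mem_flatMap.mp hb
    have hbc : b = c' := List.eq_of_mem_replicate hb'
    rw [hac, hbc]
    exact le_of_lt ((List.pairwise_cons.mp hp).1 c' hc')

-- the sorted-descending multiset, regrouped by its distinct keys
lemma sorted_rev_eq_flatMap (l : List Char) :
    PySem.List.sorted l (fun c => c) true =
      (PySem.List.sorted (PySem.Set.ofList l) (fun c => c) true).flatMap
        (fun c => List.replicate (l.count c) c) := by
  set ks := PySem.List.sorted (PySem.Set.ofList l) (fun c => c) true with hks
  have hknd : ks.Nodup :=
    (PySem.List.sorted_perm (PySem.Set.ofList l) (fun c => c) true).nodup_iff.mpr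
      (PySem.Set.nodup_ofList l)
  have hkp : ks.Pairwise (fun a b => b < a) := by
    have h1 : ks.Pairwise (fun a b => b ≤ a) := PySem.List.sorted_pairwise_rev _ _
    exact (h1.and hknd).imp (fun h => lt_of_le_of_ne h.1 (Ne.symm h.2))
  set ys := ks.flatMap (fun c => List.replicate (l.count c) c) with hys
  have hmemks : ∀ a, a ∈ ks ↔ a ∈ l := by
    intro a
    rw [hks, PySem.List.mem_sorted, PySem.Set.mem_ofList]
  have hperm : ys.Perm l := by
    rw [List.perm_iff_count]
    intro a
    rw [hys, count_flatMap_replicate _ _ ks hknd]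
    by_cases h : a ∈ l
    · simp [(hmemks a).mpr h]
    · have h' : a ∉ ks := fun hk => h ((hmemks a).mp hk)
      simp [h', List.count_eq_zero_of_not_mem h]
  have hsorted : ys.Pairwise (fun a b => b ≤ a) := pairwise_flatMap_replicate _ ks hkp
  have hpermrev : (PySem.List.sorted l (fun c => c) true).reverse.Perm ys.reverse :=
    ((List.reverse_perm _).trans
      ((PySem.List.sorted_perm l (fun c => c) true).trans hperm.symm)).trans
      (List.reverse_perm ys).symm
  have h1 : (PySem.List.sorted l (fun c => c) true).reverse = ys.reverse := by
    apply PySem.List.eq_of_perm_of_pairwise_le_of_injective (key := fun c : Char => c)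
      (fun a b h => h)
    · exact hpermrev
    · exact (List.pairwise_reverse).mpr (PySem.List.sorted_pairwise_rev _ _)
    · exact (List.pairwise_reverse).mpr hsorted
  exact List.reverse_injective h1

-- the label both programs assign to a character of s4
def pvLabel (s1 s2 _s3 : String) (c : Char) : Char :=
  if c ∈ s1.toList then '1' else if c ∈ s2.toList then '2' else '3'

-- A's loop, closed form: one label character per element of the sorted multiset
lemma solution_eq (s1 s2 s3 : String) :
    solution s1 s2 s3 =
      String.mk ((PySem.List.sorted (s1.toList ++ s2.toList ++ s3.toList) (fun c => c) true).map
        (pvLabel s1 s2 s3)) := by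
  simp only [solution]
  congr 1
  have hcg : ∀ (acc : List Char) (x : Char),
      x ∈ PySem.List.sorted (s1.toList ++ s2.toList ++ s3.toList) (fun c => c) true →
      (if PySem.Chars.isIn [x] s1.toList then acc ++ ['1']
       else if PySem.Chars.isIn [x] s2.toList then acc ++ ['2']
       else if PySem.Chars.isIn [x] s3.toList then acc ++ ['3']
       else acc) = acc ++ [pvLabel s1 s2 s3 x] := by
    intro acc x hx
    have hx' : x ∈ s1.toList ++ s2.toList ++ s3.toList := (PySem.List.mem_sorted _ _ _ _).mp hx
    simp only [isIn_singleton, pvLabel]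
    by_cases h1 : x ∈ s1.toList
    · simp [h1]
    · by_cases h2 : x ∈ s2.toList
      · simp [h1, h2]
      · have h3 : x ∈ s3.toList := by
          simp [List.mem_append] at hx'
          tauto
        simp [h1, h2, h3]
  have h1 := PySem.List.foldl_congr_mem _ _ (fun ans x => ans ++ [pvLabel s1 s2 s3 x]) ([] : List Char) hcg
  rw [h1, PySem.List.foldl_append_singleton_eq_map]
  simp

-- B's loop, closed form: label replicated count-many times per distinct key
lemma solution_alt_eq (s1 s2 s3 : String) :
    solution_alt s1 s2 s3 =
      String.mk (((PySem.List.sorted (PySem.Set.ofList (s1.toList ++ s2.toList ++ s3.toList))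
          (fun c => c) true)).flatMap
        (fun c => List.replicate ((s1.toList ++ s2.toList ++ s3.toList).count c)
          (pvLabel s1 s2 s3 c))) := by
  simp only [solution_alt]
  rw [PySem.Dict.foldl_insert_getD_add_one_eq_counter, PySem.Dict.keys_counter]
  congr 1
  rw [PySem.List.foldl_append_eq_flatMap]
  simp only [List.nil_append]
  congr 1
  funext c
  rw [PySem.Dict.getD_counter, PySem.List.pyRepeat_singleton]
  simp [isIn_singleton, pvLabel]
  omega

-- ===== VERDICT (by name: the statement is the Claim_ definition above) =====
theorem solution_spec : Claim_equal_solution := by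
  intro s1 s2 s3 _
  unfold Spec_solution
  rw [solution_eq, solution_alt_eq, sorted_rev_eq_flatMap]
  congr 1
  rw [List.map_flatMap]
  congr 1
  funext c
  rw [List.map_replicate]
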